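-- pv_equiv track=rewrite | github.com/soylemezmt/MediaOrganizer | src/mediaorganizer/consistency.py | format_normalized
-- ===== SOURCE A (Python) =====
-- from typing import Optional, List, Dict, Tuple
--
-- def format_normalized(norm: Optional[Tuple[int, ...]]) -> str:
--     if norm is None:
--         return ""
--
--     if len(norm) == 1:
--         return f"{norm[0]:04d}"
--     if len(norm) == 2:
--         return f"{norm[0]:04d}-{norm[1]:02d}"
--     if len(norm) == 3:
--         return f"{norm[0]:04d}-{norm[1]:02d}-{norm[2]:02d}"
--
--     return ",".join(str(x) for x in norm)
-- ===== SOURCE B (Python) =====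
-- def format_normalized(norm):
--     if norm is None:
--         return ""
--     if len(norm) > 3:
--         return ",".join(str(x) for x in norm)
--     return _fmt_date(list(norm), 4)
--
--
-- def _fmt_date(xs, w):
--     # recursively consume the components: first field width 4, every later one 2
--     if not xs:
--         return ""
--     head = str(xs[0]).zfill(w)
--     if len(xs) == 1:
--         return head
--     return head + "-" + _fmt_date(xs[1:], 2)
-- ===== Notes on version B (the rewrite author's own statement) =====
-- stated objective: alternative
-- what changed: A's three unrolled length-branches with hand-written f-strings are replaced by a recursive helper that consumes the tuple head-first, zero-padding each head (width 4 for the first field, 2 thereafter via the recursive width parameter) and gluing the recursive tail with '-'; the empty tuple is the recursion's base case.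
import Mathlib
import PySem

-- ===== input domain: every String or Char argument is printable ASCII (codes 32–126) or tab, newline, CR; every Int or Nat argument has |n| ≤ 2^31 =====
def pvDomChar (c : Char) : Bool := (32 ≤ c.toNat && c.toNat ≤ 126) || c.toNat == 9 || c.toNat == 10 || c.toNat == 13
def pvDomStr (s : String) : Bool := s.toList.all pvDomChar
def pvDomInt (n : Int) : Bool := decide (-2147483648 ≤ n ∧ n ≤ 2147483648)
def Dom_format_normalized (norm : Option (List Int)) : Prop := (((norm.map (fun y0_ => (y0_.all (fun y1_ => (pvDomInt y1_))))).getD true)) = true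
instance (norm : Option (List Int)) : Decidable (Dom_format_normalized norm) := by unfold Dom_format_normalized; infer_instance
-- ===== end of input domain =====

-- ===== PORT A =====
-- B replaces A's three unrolled length-branches by a head-first recursion that pads each
-- component (width 4 first, then 2) and glues the recursive tail with "-"; objective: alternative.
-- f"{x:0wd}" is ported exactly as str(x).zfill(w) (sign stays in front), alike in both ports.
def pyFmt0d (x : Int) (w : Nat) : String := PySem.Str.zfill (PySem.Int.toStr x) w

def format_normalized (norm : Option (List Int)) : String :=
  match norm with
  | none => ""
  | some t =>
    if t.length = 1 then pyFmt0d ((PySem.List.pyGet? t 0).getD 0) 4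
    else if t.length = 2 then
      pyFmt0d ((PySem.List.pyGet? t 0).getD 0) 4 ++ "-" ++ pyFmt0d ((PySem.List.pyGet? t 1).getD 0) 2
    else if t.length = 3 then
      pyFmt0d ((PySem.List.pyGet? t 0).getD 0) 4 ++ "-" ++ pyFmt0d ((PySem.List.pyGet? t 1).getD 0) 2
        ++ "-" ++ pyFmt0d ((PySem.List.pyGet? t 2).getD 0) 2
    else PySem.Str.join "," (t.map PySem.Int.toStr)

-- ===== PORT B =====
-- _fmt_date: recursive consumption of the components, width 4 for the head, 2 thereafter.
def fmtDate : List Int → Nat → String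
  | [], _ => ""
  | [x], w => pyFmt0d x w
  | x :: rest, w => pyFmt0d x w ++ "-" ++ fmtDate rest 2

def format_normalized_alt (norm : Option (List Int)) : String :=
  match norm with
  | none => ""
  | some t =>
    if t.length > 3 then PySem.Str.join "," (t.map PySem.Int.toStr)
    else fmtDate t 4

-- ===== PRECONDITION & SPEC =====
def Spec_format_normalized (norm : Option (List Int)) (out : String) : Prop := out = format_normalized_alt norm
instance (norm : Option (List Int)) (out : String) : Decidable (Spec_format_normalized norm out) := by unfold Spec_format_normalized; infer_instance

-- ===== CLAIM (what is proved, stated in full; the proofs are below) =====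
def Claim_equal_format_normalized : Prop := ∀ (norm : Option (List Int)), Dom_format_normalized norm → Spec_format_normalized norm (format_normalized norm)

-- ===== LEMMAS AND PROOFS =====
theorem fn_eq (norm : Option (List Int)) : format_normalized norm = format_normalized_alt norm := by
  rcases norm with _ | t
  · rfl
  rcases t with _ | ⟨a, _ | ⟨b, _ | ⟨c, _ | ⟨d, r⟩⟩⟩⟩
  · rfl
  · simp [format_normalized, format_normalized_alt, fmtDate, PySem.List.pyGet?, PySem.List.pyIdx?]
  · simp [format_normalized, format_normalized_alt, fmtDate, PySem.List.pyGet?, PySem.List.pyIdx?]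
  · simp only [format_normalized, format_normalized_alt, fmtDate, PySem.List.pyGet?, PySem.List.pyIdx?]
    simp [String.append_assoc]
  · simp [format_normalized, format_normalized_alt]

theorem format_normalized_spec : Claim_equal_format_normalized := by
  intro norm _
  exact fn_eq norm
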